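-- pv_equiv track=rewrite | github.com/navmou/lunar_lander | logic.py | diagonal_minus_2
-- ===== SOURCE A (Python) =====
-- def diagonal_minus_2(board , player , x , y , rewards):
--     if x < 7 and y < 7:
--         if board[x+1][y+1] == -player:
--             rewards+=1
--             return diagonal_minus_2(board,player,x+1,y+1,rewards)
--         elif board[x+1][y+1] == player:
--             return False , 0 , (x,y)
--         elif board[x+1][y+1] == 0:
--             if rewards == 0:
--                 return False , 0 , (x,y)
--             else:
--                 return True,rewards , (x+1 , y+1)
--     else:
--         return False , 0 , (x,y)
-- ===== SOURCE B (Python) =====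
-- def diagonal_minus_2(board, player, x, y, rewards):
--     # Phase 1: count the run of opponent pieces along the down-right diagonal.
--     k = 0
--     while x + k < 7 and y + k < 7 and board[x + k + 1][y + k + 1] == -player:
--         k += 1
--     x, y = x + k, y + k
--     # Phase 2: decide from the cell (or boundary) that stopped the scan.
--     if not (x < 7 and y < 7):
--         return False, 0, (x, y)
--     cell = board[x + 1][y + 1]
--     if cell == player:
--         return False, 0, (x, y)
--     if cell == 0:
--         total = rewards + k
--         if total == 0:
--             return False, 0, (x, y)
--         return True, total, (x + 1, y + 1)
--     return None
-- ===== Notes on version B (the rewrite author's own statement) =====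
-- stated objective: alternative
-- what changed: Replaces A's tail recursion (which re-reads the cell and threads the accumulator through every call) by a two-phase iterative form: a while loop that only counts the run length k of opponent pieces along the diagonal, then a single decision step on the stopping cell using rewards+k.
-- outside the precondition, e.g. on diagonal_minus_2([[5, 5], [5, 5]], 1, 0, 0, 0): A returns None, B returns None; on diagonal_minus_2([[0]], 1, 1, 1, 0): A raises IndexError, B raises IndexError
import Mathlib
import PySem

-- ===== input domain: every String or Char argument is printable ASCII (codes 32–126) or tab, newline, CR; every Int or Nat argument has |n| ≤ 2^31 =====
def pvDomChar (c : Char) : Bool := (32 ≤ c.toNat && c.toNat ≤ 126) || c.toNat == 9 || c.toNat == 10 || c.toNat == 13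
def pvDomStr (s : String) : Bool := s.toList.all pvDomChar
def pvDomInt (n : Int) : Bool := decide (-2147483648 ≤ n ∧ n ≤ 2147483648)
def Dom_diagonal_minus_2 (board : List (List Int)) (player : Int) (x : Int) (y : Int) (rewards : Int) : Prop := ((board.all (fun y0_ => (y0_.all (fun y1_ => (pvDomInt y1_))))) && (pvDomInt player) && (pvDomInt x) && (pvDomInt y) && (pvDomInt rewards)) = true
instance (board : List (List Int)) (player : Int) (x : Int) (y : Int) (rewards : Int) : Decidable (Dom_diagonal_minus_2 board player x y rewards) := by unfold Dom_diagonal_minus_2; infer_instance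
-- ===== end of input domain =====

-- B replaces A's accumulator-threading tail recursion by a two-phase form (count the
-- run of opponent pieces, then one decision step); objective: alternative decomposition.

-- board[a+1][b+1], shared address computation of both Pythons (none = IndexError)
def cellAt (board : List (List Int)) (a b : Int) : Option Int :=
  (PySem.List.pyGet? board (a + 1)).bind (fun row => PySem.List.pyGet? row (b + 1))

-- ===== PORT A =====
def diagonal_minus_2 (board : List (List Int)) (player : Int) (x : Int) (y : Int) (rewards : Int) : Bool × Int × (Int × Int) :=
  if x < 7 ∧ y < 7 then
    match cellAt board x y with
    | some c =>
      if c = -player then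
        diagonal_minus_2 board player (x + 1) (y + 1) (rewards + 1)
      else if c = player then (false, 0, (x, y))
      else if c = 0 then
        if rewards = 0 then (false, 0, (x, y)) else (true, rewards, (x + 1, y + 1))
      else (false, 0, (x, y))   -- Python falls through returning None here; excluded by Pre_
    | none => (false, 0, (x, y))  -- Python raises IndexError here; excluded by Pre_
  else (false, 0, (x, y))
termination_by (7 - x).toNat
decreasing_by omega

-- ===== PORT B =====
-- phase 1 of Source B: the while loop counting the run of opponent pieces
def diagScan (board : List (List Int)) (player : Int) (x y : Int) : Nat :=
  if x < 7 ∧ y < 7 ∧ cellAt board x y = some (-player) then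
    diagScan board player (x + 1) (y + 1) + 1
  else 0
termination_by (7 - x).toNat
decreasing_by omega

def diagonal_minus_2_alt (board : List (List Int)) (player : Int) (x : Int) (y : Int) (rewards : Int) : Bool × Int × (Int × Int) :=
  let k : Int := diagScan board player x y
  let x' := x + k
  let y' := y + k
  if ¬(x' < 7 ∧ y' < 7) then (false, 0, (x', y'))
  else
    match cellAt board x' y' with
    | some cell =>
      if cell = player then (false, 0, (x', y'))
      else if cell = 0 then
        if rewards + k = 0 then (false, 0, (x', y'))
        else (true, rewards + k, (x' + 1, y' + 1))
      else (false, 0, (x', y'))   -- Python returns None here; excluded by Pre_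
    | none => (false, 0, (x', y'))  -- Python raises IndexError here; excluded by Pre_

-- ===== PRECONDITION & SPEC =====
def okCell (player : Int) (o : Option Int) : Bool :=
  match o with
  | none => false
  | some c => c = -player || c = player || c = 0

-- number of steps that can possibly matter: 7-bound steps, capped by the count of
-- Python-valid indices into board (2*len), so the condition stays small to check
def preFuel (board : List (List Int)) (x y : Int) : Nat :=
  min ((7 - max x y).toNat) (2 * board.length + 1)

-- Pre_ excludes exactly the inputs where the diagonal walk hits an index outside the
-- board (Python raises IndexError) or a cell value outside {-player, player, 0}
-- (Python falls off the if-chain and returns None, which is not a tuple).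
def Pre_diagonal_minus_2 (board : List (List Int)) (player : Int) (x : Int) (y : Int) (_rewards : Int) : Prop :=
  ∀ i : Nat, i < preFuel board x y →
    (∀ j : Nat, j < i → cellAt board (x + (j : Int)) (y + (j : Int)) = some (-player)) →
    okCell player (cellAt board (x + (i : Int)) (y + (i : Int))) = true

instance (board : List (List Int)) (player : Int) (x : Int) (y : Int) (rewards : Int) : Decidable (Pre_diagonal_minus_2 board player x y rewards) := by unfold Pre_diagonal_minus_2; infer_instance

def pvWitness_diagonal_minus_2 : List (List Int) × Int × Int × Int × Int :=
  ([[0, 0], [0, 0]], 1, 0, 0, 0)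

def Spec_diagonal_minus_2 (board : List (List Int)) (player : Int) (x : Int) (y : Int) (rewards : Int) (out : Bool × Int × (Int × Int)) : Prop := out = diagonal_minus_2_alt board player x y rewards
instance (board : List (List Int)) (player : Int) (x : Int) (y : Int) (rewards : Int) (out : Bool × Int × (Int × Int)) : Decidable (Spec_diagonal_minus_2 board player x y rewards out) := by unfold Spec_diagonal_minus_2; infer_instance

-- ===== CLAIM (what is proved, stated in full; the proofs are below) =====
def Claim_equal_diagonal_minus_2 : Prop := ∀ (board : List (List Int)) (player : Int) (x : Int) (y : Int) (rewards : Int), Dom_diagonal_minus_2 board player x y rewards → Pre_diagonal_minus_2 board player x y rewards → Spec_diagonal_minus_2 board player x y rewards (diagonal_minus_2 board player x y rewards)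

-- ===== LEMMAS AND PROOFS =====
theorem cellAt_outer_bound {board : List (List Int)} {a b : Int} {c : Int}
    (h : cellAt board a b = some c) : -(board.length : Int) ≤ a + 1 ∧ a + 1 < board.length := by
  unfold cellAt at h
  cases hr : PySem.List.pyGet? board (a + 1) with
  | none => rw [hr] at h; simp at h
  | some row =>
    by_contra hc
    rw [show PySem.List.pyGet? board (a + 1) = none from by
      rw [PySem.List.pyGet?_eq_none_iff]; unfold PySem.Raise.InRange; omega] at hr
    simp at hr

theorem pre_shift {board : List (List Int)} {player x y rewards : Int}
    (_hx : x < 7) (_hy : y < 7) (hc : cellAt board x y = some (-player))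
    (hp : Pre_diagonal_minus_2 board player x y rewards) :
    Pre_diagonal_minus_2 board player (x + 1) (y + 1) (rewards + 1) := by
  intro i hi hprev
  set L := board.length with hL
  by_cases hfit : i + 1 < preFuel board x y
  · have := hp (i + 1) hfit (by
      intro j hj
      cases j with
      | zero => simpa using hc
      | succ j' =>
        have := hprev j' (by omega)
        have e1 : x + ((j' + 1 : Nat) : Int) = x + 1 + (j' : Int) := by push_cast; ring
        have e2 : y + ((j' + 1 : Nat) : Int) = y + 1 + (j' : Int) := by push_cast; ring
        rw [e1, e2]; exact this)
    have e1 : x + ((i + 1 : Nat) : Int) = x + 1 + (i : Int) := by push_cast; ring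
    have e2 : y + ((i + 1 : Nat) : Int) = y + 1 + (i : Int) := by push_cast; ring
    rw [e1, e2] at this
    exact this
  · -- the walk cannot really be 2L+1 cells long: pigeonhole on valid row indices
    exfalso
    have hb1 := cellAt_outer_bound hc
    have hiub : i < preFuel board (x + 1) (y + 1) := hi
    unfold preFuel at hiub hfit
    have hi2L : i = 2 * L := by omega
    have hLpos : 0 < L := by
      rcases Nat.eq_zero_or_pos L with h0 | h; · omega
      · exact h
    have hlast := hprev (2 * L - 1) (by omega)
    have hb2 := cellAt_outer_bound hlast
    omega

theorem alt_step {board : List (List Int)} {player x y rewards : Int}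
    (_hx : x < 7) (_hy : y < 7) (hc : cellAt board x y = some (-player)) :
    diagonal_minus_2_alt board player x y rewards
      = diagonal_minus_2_alt board player (x + 1) (y + 1) (rewards + 1) := by
  have hscan : diagScan board player x y = diagScan board player (x + 1) (y + 1) + 1 := by
    rw [diagScan]; simp [_hx, _hy, hc]
  simp only [diagonal_minus_2_alt, hscan]
  have e1 : x + ((diagScan board player (x + 1) (y + 1) + 1 : Nat) : Int)
      = x + 1 + ((diagScan board player (x + 1) (y + 1) : Nat) : Int) := by push_cast; ring
  have e2 : y + ((diagScan board player (x + 1) (y + 1) + 1 : Nat) : Int)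
      = y + 1 + ((diagScan board player (x + 1) (y + 1) : Nat) : Int) := by push_cast; ring
  have e3 : rewards + ((diagScan board player (x + 1) (y + 1) + 1 : Nat) : Int)
      = rewards + 1 + ((diagScan board player (x + 1) (y + 1) : Nat) : Int) := by push_cast; ring
  rw [e1, e2, e3]

theorem alt_stop {board : List (List Int)} {player x y : Int} (rewards : Int)
    (hstop : ¬(x < 7 ∧ y < 7 ∧ cellAt board x y = some (-player))) :
    diagonal_minus_2_alt board player x y rewards =
      (if ¬(x < 7 ∧ y < 7) then (false, 0, (x, y))
       else
        match cellAt board x y with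
        | some cell =>
          if cell = player then (false, 0, (x, y))
          else if cell = 0 then
            if rewards = 0 then (false, 0, (x, y))
            else (true, rewards, (x + 1, y + 1))
          else (false, 0, (x, y))
        | none => (false, 0, (x, y))) := by
  have hscan : diagScan board player x y = 0 := by
    rw [diagScan]; simp only [if_neg hstop]
  simp only [diagonal_minus_2_alt, hscan]
  norm_num

theorem main_equiv (board : List (List Int)) (player : Int) :
    ∀ n : Nat, ∀ x y rewards : Int, (7 - x).toNat ≤ n →
      Pre_diagonal_minus_2 board player x y rewards →
      diagonal_minus_2 board player x y rewards = diagonal_minus_2_alt board player x y rewards := by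
  intro n
  induction n with
  | zero =>
    intro x y rewards hn hp
    have hx : ¬(x < 7 ∧ y < 7) := by omega
    rw [diagonal_minus_2, if_neg hx, alt_stop rewards (by tauto), if_pos hx]
  | succ n ih =>
    intro x y rewards hn hp
    by_cases hb : x < 7 ∧ y < 7
    · have hfuel0 : 0 < preFuel board x y := by
        unfold preFuel; omega
      have h0 := hp 0 hfuel0 (by intro j hj; omega)
      simp only [Nat.cast_zero, add_zero] at h0
      cases hcell : cellAt board x y with
      | none => rw [hcell] at h0; simp [okCell] at h0
      | some c =>
        rw [hcell] at h0
        by_cases hc1 : c = -player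
        · subst hc1
          rw [diagonal_minus_2, if_pos hb, hcell]
          simp only [if_pos rfl]
          rw [ih (x + 1) (y + 1) (rewards + 1) (by omega)
              (pre_shift hb.1 hb.2 hcell hp)]
          exact (alt_step hb.1 hb.2 hcell).symm
        · have hA : diagonal_minus_2 board player x y rewards =
              (if c = player then (false, 0, (x, y))
               else if c = 0 then
                 if rewards = 0 then (false, 0, (x, y)) else (true, rewards, (x + 1, y + 1))
               else (false, 0, (x, y))) := by
            rw [diagonal_minus_2, if_pos hb, hcell]
            simp only [if_neg hc1]
          rw [hA, alt_stop rewards (by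
            rintro ⟨_, _, hsome⟩
            rw [hcell] at hsome
            exact hc1 (by injection hsome)), hcell]
          simp [hb]
    · rw [diagonal_minus_2, if_neg hb, alt_stop rewards (by tauto), if_pos hb]

-- ===== VERDICT (by name: the statement is the Claim_ definition above) =====
theorem diagonal_minus_2_spec : Claim_equal_diagonal_minus_2 := by
  intro board player x y rewards _ hp
  unfold Spec_diagonal_minus_2
  exact main_equiv board player (7 - x).toNat x y rewards le_rfl hp
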